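-- pv_equiv track=rewrite | github.com/ldgeorge85/dialogues | src/agents/quorum.py | quorum_decision
-- ===== SOURCE A (Python) =====
-- def quorum_decision(judge_votes):
--     """
--     Determine the winner from a list of judge votes.
--     Args:
--         judge_votes (list): List of agent names voted for by judges
--     Returns:
--         tuple: (winner, vote_count, is_tie, vote_breakdown)
--     """
--     from collections import Counter
--     if not judge_votes:
--         return (None, 0, True, {})
--     counter = Counter(judge_votes)
--     # If only one agent has the most votes, they win; otherwise, it's a tie
--     most_common = counter.most_common()
--     if len(most_common) == 1:
--         # Only one agent received any votes
--         winner, count = most_common[0]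
--         is_tie = False
--     else:
--         top_count = most_common[0][1]
--         top_agents = [agent for agent, c in most_common if c == top_count]
--         if len(top_agents) == 1:
--             winner = top_agents[0]
--             count = top_count
--             is_tie = False
--         else:
--             winner = None
--             count = top_count
--             is_tie = True
--     # Output full vote breakdown for debugging
--     vote_breakdown = dict(counter)
--     return (winner, count, is_tie, vote_breakdown)
-- ===== SOURCE B (Python) =====
-- def quorum_decision(judge_votes):
--     """
--     Determine the winner from a list of judge votes.
--     Streaming single pass: track the running top count, how many agents share
--     it, and the current sole leader, updating as each vote arrives; no second
--     scan over the counts and no sort.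
--     """
--     counts = {}
--     top = 0
--     leaders = 0
--     leader = None
--     for v in judge_votes:
--         c = counts.get(v, 0) + 1
--         counts[v] = c
--         if c > top:
--             top, leaders, leader = c, 1, v
--         elif c == top:
--             leaders += 1
--     if not counts:
--         return (None, 0, True, {})
--     if leaders == 1:
--         return (leader, top, False, counts)
--     return (None, top, True, counts)
-- ===== Notes on version B (the rewrite author's own statement) =====
-- stated objective: alternative
-- what changed: B replaces A's count-then-sort-then-filter staging (Counter, most_common, a list comprehension over it) with a single streaming pass that maintains the running top count, the number of agents sharing it, and the current sole leader, deciding the winner with no second scan and no sort.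
import Mathlib
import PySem

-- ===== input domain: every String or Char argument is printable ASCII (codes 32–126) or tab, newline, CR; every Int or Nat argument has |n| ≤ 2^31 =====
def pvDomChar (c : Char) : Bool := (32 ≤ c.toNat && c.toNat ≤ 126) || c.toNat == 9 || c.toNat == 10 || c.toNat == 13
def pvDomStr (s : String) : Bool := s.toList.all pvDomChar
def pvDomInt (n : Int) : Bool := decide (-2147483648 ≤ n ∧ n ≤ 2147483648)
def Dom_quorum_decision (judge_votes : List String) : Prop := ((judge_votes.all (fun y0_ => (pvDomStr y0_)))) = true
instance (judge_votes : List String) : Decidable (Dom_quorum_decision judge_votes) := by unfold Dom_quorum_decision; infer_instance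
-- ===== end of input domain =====

-- B replaces A's count-then-sort-then-filter staging (Counter / most_common / comprehension) by a
-- single streaming pass that tracks the running top count, how many agents share it, and the
-- current sole leader; same return value everywhere (objective: alternative).

-- ===== PORT A =====
def quorum_decision (judge_votes : List String) : Option String × Int × Bool × (List (String × Int)) :=
  if judge_votes = [] then (none, 0, true, [])
  else
    let counter := PySem.Dict.counter judge_votes
    -- most_common() = sorted(items, key=count, reverse=True), stable
    let most_common := PySem.List.sorted counter.items (fun p => p.2) true
    let vote_breakdown := counter.items
    if most_common.length = 1 then
      -- most_common[0]; most_common is nonempty here, so the default is unreachable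
      let p := PySem.List.pyGetD most_common 0 ("", 0)
      (some p.1, p.2, false, vote_breakdown)
    else
      let top_count := (PySem.List.pyGetD most_common 0 ("", 0)).2
      let top_agents := (most_common.filter (fun p => p.2 == top_count)).map (fun p => p.1)
      if top_agents.length = 1 then
        (some (PySem.List.pyGetD top_agents 0 ""), top_count, false, vote_breakdown)
      else
        (none, top_count, true, vote_breakdown)

-- ===== PORT B =====
-- loop body: state = (counts, top, leaders, leader)
def bStep (s : PySem.Dict String Int × Int × Int × Option String) (v : String) :
    PySem.Dict String Int × Int × Int × Option String :=
  let c := s.1.getD v 0 + 1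
  let d := s.1.insert v c
  if c > s.2.1 then (d, c, 1, some v)
  else if c = s.2.1 then (d, s.2.1, s.2.2.1 + 1, s.2.2.2)
  else (d, s.2.1, s.2.2.1, s.2.2.2)

def quorum_decision_alt (judge_votes : List String) : Option String × Int × Bool × (List (String × Int)) :=
  let s := judge_votes.foldl bStep (PySem.Dict.empty, 0, 0, none)
  if s.1.items = [] then (none, 0, true, [])
  else if s.2.2.1 = 1 then (s.2.2.2, s.2.1, false, s.1.items)
  else (none, s.2.1, true, s.1.items)

-- ===== PRECONDITION & SPEC =====
def Spec_quorum_decision (judge_votes : List String) (out : Option String × Int × Bool × (List (String × Int))) : Prop := out = quorum_decision_alt judge_votes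
instance (judge_votes : List String) (out : Option String × Int × Bool × (List (String × Int))) : Decidable (Spec_quorum_decision judge_votes out) := by unfold Spec_quorum_decision; infer_instance

-- ===== CLAIM (what is proved, stated in full; the proofs are below) =====
def Claim_equal_quorum_decision : Prop := ∀ (judge_votes : List String), Dom_quorum_decision judge_votes → Spec_quorum_decision judge_votes (quorum_decision judge_votes)

-- ===== LEMMAS AND PROOFS =====

-- invariant of B's loop after processing the prefix `pre`:
-- counts = Counter(pre); top = max count (0 when empty); leaders = #agents at top;
-- and when exactly one agent is at top, leader is that agent.
def BInv (pre : List String) (s : PySem.Dict String Int × Int × Int × Option String) : Prop :=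
  s.1 = PySem.Dict.counter pre ∧
  s.2.1 = ((PySem.Set.ofList pre).map (fun k => (pre.count k : Int))).foldl max 0 ∧
  s.2.2.1 = ((PySem.Set.ofList pre).countP (fun k => (pre.count k : Int) == s.2.1) : Int) ∧
  ∀ k0, (PySem.Set.ofList pre).filter (fun k => (pre.count k : Int) == s.2.1) = [k0] →
    s.2.2.2 = some k0

-- the running max over a list of Ints started at 0
theorem foldl_max_zero_eq (l : List Int) (c : Int) (hc : c ∈ l) (hub : ∀ y ∈ l, y ≤ c)
    (h0 : 0 ≤ c) : l.foldl max 0 = c := by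
  have h1 : c ≤ l.foldl max 0 := (PySem.List.le_foldl_max l 0).2 c hc
  have h2 : l.foldl max 0 = 0 ∨ l.foldl max 0 ∈ l := PySem.List.foldl_max_mem l 0
  rcases h2 with h2 | h2
  · omega
  · exact le_antisymm (hub _ h2) h1

-- flipping one element of a Nodup list from false to true adds one to countP
theorem countP_flip_succ {α : Type} (ks : List α) (p q : α → Bool) (v : α)
    (hnd : ks.Nodup) (hv : v ∈ ks) (hagree : ∀ k ∈ ks, k ≠ v → p k = q k)
    (hpv : p v = false) (hqv : q v = true) : ks.countP q = ks.countP p + 1 := by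
  induction ks with
  | nil => cases hv
  | cons a t ih =>
    rcases List.nodup_cons.mp hnd with ⟨hat, hndt⟩
    rcases List.mem_cons.mp hv with rfl | hvt
    · have ht : ∀ k ∈ t, p k = q k := fun k hk =>
        hagree k (List.mem_cons_of_mem _ hk) (fun h => hat (h ▸ hk))
      have : t.countP q = t.countP p :=
        List.countP_congr (fun x hx => by rw [ht x hx])
      simp [hpv, hqv, this]
    · have hav : a ≠ v := fun h => hat (h ▸ hvt)
      have hpa : p a = q a := hagree a List.mem_cons_self hav
      have := ih hndt hvt (fun k hk => hagree k (List.mem_cons_of_mem _ hk))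
      simp [List.countP_cons, ← hpa, this]
      omega

-- a predicate true at exactly one element of a Nodup list filters to that singleton
theorem filter_eq_singleton_of {α : Type} (ks : List α) (q : α → Bool) (v : α)
    (hnd : ks.Nodup) (hv : v ∈ ks) (hqv : q v = true)
    (hother : ∀ k ∈ ks, k ≠ v → q k = false) : ks.filter q = [v] := by
  induction ks with
  | nil => cases hv
  | cons a t ih =>
    rcases List.nodup_cons.mp hnd with ⟨hat, hndt⟩
    rcases List.mem_cons.mp hv with rfl | hvt
    · have ht : t.filter q = [] := List.filter_eq_nil_iff.mpr
        (fun k hk => by simp [hother k (List.mem_cons_of_mem _ hk) (fun h => hat (h ▸ hk))])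
      simp [hqv, ht]
    · have hav : a ≠ v := fun h => hat (h ▸ hvt)
      have hqa : q a = false := hother a List.mem_cons_self hav
      simp [hqa, ih hndt hvt (fun k hk => hother k (List.mem_cons_of_mem _ hk))]

theorem bStep_inv (pre : List String) (s : PySem.Dict String Int × Int × Int × Option String)
    (v : String) (h : BInv pre s) : BInv (pre ++ [v]) (bStep s v) := by
  obtain ⟨d, top, nl, ld⟩ := s
  obtain ⟨hd, hT, hN, hL⟩ := h
  simp only at hd hT hN hL
  have hks' : PySem.Set.ofList (pre ++ [v])
      = if v ∈ pre then PySem.Set.ofList pre else PySem.Set.ofList pre ++ [v] := by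
    rw [PySem.Set.ofList_eq_foldl, List.foldl_append, ← PySem.Set.ofList_eq_foldl]
    simp [PySem.Set.add, PySem.Set.contains, PySem.Set.mem_ofList]
  have hcnt' : ∀ k : String, (((pre ++ [v]).count k : Int))
      = (pre.count k : Int) + (if k = v then 1 else 0) := by
    intro k
    by_cases hkv : k = v
    · subst hkv; simp [List.count_append]
    · have h0 : List.count k [v] = 0 := List.count_eq_zero.mpr (by simp [hkv])
      simp [List.count_append, h0, hkv]
  have hnd : (PySem.Set.ofList pre).Nodup := PySem.Set.nodup_ofList pre
  have hmem : ∀ k : String, k ∈ PySem.Set.ofList pre ↔ k ∈ pre :=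
    fun k => PySem.Set.mem_ofList pre k
  have hub : ∀ k ∈ PySem.Set.ofList pre, (pre.count k : Int) ≤ top := by
    intro k hk
    rw [hT]
    exact (PySem.List.le_foldl_max _ 0).2 _ (List.mem_map.mpr ⟨k, hk, rfl⟩)
  have hpos : ∀ k ∈ PySem.Set.ofList pre, (1 : Int) ≤ (pre.count k : Int) := by
    intro k hk
    exact_mod_cast List.count_pos_iff.mpr ((hmem k).mp hk)
  have hgetD : d.getD v 0 = (pre.count v : Int) := by rw [hd, PySem.Dict.getD_counter]
  set c : Int := (pre.count v : Int) + 1 with hc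
  have hc1 : (1 : Int) ≤ c := by
    have : (0 : Int) ≤ (pre.count v : Int) := Int.natCast_nonneg _
    omega
  have hdict : d.insert v c = PySem.Dict.counter (pre ++ [v]) := by
    rw [PySem.Dict.counter_append_singleton, hd, hc, ← PySem.Dict.getD_counter (xs := pre)]
    rfl
  have hcv : ((pre ++ [v]).count v : Int) = c := by rw [hcnt' v]; simp [hc]
  have hcother : ∀ k : String, k ≠ v → ((pre ++ [v]).count k : Int) = (pre.count k : Int) := by
    intro k hk; rw [hcnt' k]; simp [hk]
  by_cases hvp : v ∈ pre
  · -- v already counted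
    have hvk : v ∈ PySem.Set.ofList pre := (hmem v).mpr hvp
    have hcle : c ≤ top + 1 := by have := hub v hvk; omega
    by_cases h1 : c > top
    · -- new strict leader v
      have hstep : bStep (d, top, nl, ld) v = (d.insert v c, c, 1, some v) := by
        simp only [bStep, hgetD, ← hc]
        rw [if_pos h1]
      have hTnew : ((PySem.Set.ofList pre).map (fun k => ((pre ++ [v]).count k : Int))).foldl max 0 = c := by
        apply foldl_max_zero_eq
        · exact List.mem_map.mpr ⟨v, hvk, hcv⟩
        · intro y hy
          obtain ⟨k, hk, rfl⟩ := List.mem_map.mp hy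
          by_cases hkv : k = v
          · rw [hkv, hcv]
          · rw [hcother k hkv]; have := hub k hk; omega
        · omega
      have hfilt : (PySem.Set.ofList pre).filter (fun k => (((pre ++ [v]).count k : Int)) == c) = [v] := by
        apply filter_eq_singleton_of _ _ _ hnd hvk
        · rw [hcv]; simp
        · intro k hk hkv
          have := hub k hk
          rw [hcother k hkv]
          simp only [beq_eq_false_iff_ne]
          omega
      simp only [BInv, hstep, hks', if_pos hvp]
      refine ⟨hdict, hTnew.symm, ?_, ?_⟩
      · rw [List.countP_eq_length_filter, hfilt]; rfl
      · intro k0 hk0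
        rw [hfilt] at hk0
        injection hk0 with h hrest
        rw [h]
    · -- c ≤ top; top stays, pre nonempty
      have hTw : ∃ k0 ∈ PySem.Set.ofList pre, (pre.count k0 : Int) = top := by
        rcases PySem.List.foldl_max_mem ((PySem.Set.ofList pre).map (fun k => (pre.count k : Int))) 0 with h0 | hmem'
        · exfalso; have := hub v hvk; have := hpos v hvk; rw [hT] at *; omega
        · rw [← hT] at hmem'
          obtain ⟨k0, hk0, hk0e⟩ := List.mem_map.mp hmem'
          exact ⟨k0, hk0, hk0e⟩
      have hTnew : ((PySem.Set.ofList pre).map (fun k => ((pre ++ [v]).count k : Int))).foldl max 0 = top := by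
        obtain ⟨k0, hk0, hk0e⟩ := hTw
        by_cases hkv : k0 = v
        · -- then count v = top, so c = top + 1 > top, contradiction with ¬ h1
          exfalso; rw [hkv] at hk0e; omega
        · apply foldl_max_zero_eq
          · exact List.mem_map.mpr ⟨k0, hk0, by rw [hcother k0 hkv, hk0e]⟩
          · intro y hy
            obtain ⟨k, hk, rfl⟩ := List.mem_map.mp hy
            by_cases hkv' : k = v
            · rw [hkv', hcv]; omega
            · rw [hcother k hkv']; exact hub k hk
          · have := hpos k0 hk0; omega
      by_cases h2 : c = top
      · -- v joins the leaders; afterwards at least two share the top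
        have hstep : bStep (d, top, nl, ld) v = (d.insert v c, top, nl + 1, ld) := by
          simp only [bStep, hgetD, ← hc]
          rw [if_neg h1, if_pos h2]
        have hNnew : (PySem.Set.ofList pre).countP (fun k => (((pre ++ [v]).count k : Int)) == top)
            = (PySem.Set.ofList pre).countP (fun k => ((pre.count k : Int)) == top) + 1 := by
          apply countP_flip_succ _ _ _ v hnd hvk
          · intro k hk hkv; rw [hcother k hkv]
          · simp only [beq_eq_false_iff_ne]; omega
          · simp only [beq_iff_eq]; rw [hcv, h2]
        have hold1 : 1 ≤ (PySem.Set.ofList pre).countP (fun k => ((pre.count k : Int)) == top) := by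
          obtain ⟨k0, hk0, hk0e⟩ := hTw
          exact List.countP_pos_iff.mpr ⟨k0, hk0, by simp [hk0e]⟩
        simp only [BInv, hstep, hks', if_pos hvp]
        refine ⟨hdict, hTnew.symm, ?_, ?_⟩
        · rw [hNnew, hN]; push_cast; ring
        · intro k0 hk0
          exfalso
          have h1' : (PySem.Set.ofList pre).countP (fun k => (((pre ++ [v]).count k : Int)) == top) = 1 := by
            rw [List.countP_eq_length_filter, hk0]; rfl
          omega
      · -- c stays strictly below top: state unchanged except the dict
        have hstep : bStep (d, top, nl, ld) v = (d.insert v c, top, nl, ld) := by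
          simp only [bStep, hgetD, ← hc]
          rw [if_neg h1, if_neg h2]
        have hpe : ∀ k ∈ PySem.Set.ofList pre,
            ((((pre ++ [v]).count k : Int)) == top) = (((pre.count k : Int)) == top) := by
          intro k hk
          by_cases hkv : k = v
          · rw [hkv, hcv]
            have hne1 : ((c == top) : Bool) = false := by
              simp only [beq_eq_false_iff_ne]; exact h2
            have hne2 : (((pre.count v : Int) == top) : Bool) = false := by
              simp only [beq_eq_false_iff_ne]; omega
            rw [hne1, hne2]
          · rw [hcother k hkv]
        have hNnew : (PySem.Set.ofList pre).countP (fun k => (((pre ++ [v]).count k : Int)) == top)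
            = (PySem.Set.ofList pre).countP (fun k => ((pre.count k : Int)) == top) :=
          List.countP_congr (fun k hk => by rw [hpe k hk])
        have hFnew : (PySem.Set.ofList pre).filter (fun k => (((pre ++ [v]).count k : Int)) == top)
            = (PySem.Set.ofList pre).filter (fun k => ((pre.count k : Int)) == top) :=
          List.filter_congr (fun k hk => by rw [hpe k hk])
        simp only [BInv, hstep, hks', if_pos hvp]
        refine ⟨hdict, hTnew.symm, ?_, ?_⟩
        · rw [hNnew]; exact hN
        · intro k0 hk0
          rw [hFnew] at hk0
          exact hL k0 hk0
  · -- first vote for v: it is appended to the key set with count 1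
    have hc1' : c = 1 := by
      have : pre.count v = 0 := List.count_eq_zero.mpr hvp
      omega
    have hvnk : v ∉ PySem.Set.ofList pre := fun h => hvp ((hmem v).mp h)
    have hmap : (PySem.Set.ofList pre ++ [v]).map (fun k => ((pre ++ [v]).count k : Int))
        = (PySem.Set.ofList pre).map (fun k => (pre.count k : Int)) ++ [c] := by
      rw [List.map_append]
      congr 1
      · exact List.map_congr_left (fun k hk => hcother k (fun h => hvnk (h ▸ hk)))
      · simp only [List.map_cons, List.map_nil, hcv]
    by_cases h1 : c > top
    · -- c = 1 > top forces an empty prefix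
      have hstep : bStep (d, top, nl, ld) v = (d.insert v c, c, 1, some v) := by
        simp only [bStep, hgetD, ← hc]
        rw [if_pos h1]
      have htop0 : top = 0 := by
        rcases PySem.List.foldl_max_mem ((PySem.Set.ofList pre).map (fun k => (pre.count k : Int))) 0 with h0 | hmem'
        · rw [hT]; exact h0
        · exfalso
          rw [← hT] at hmem'
          obtain ⟨k0, hk0, hk0e⟩ := List.mem_map.mp hmem'
          have := hpos k0 hk0; omega
      have hksnil : PySem.Set.ofList pre = [] := by
        by_contra hne
        obtain ⟨k0, hk0⟩ := List.exists_mem_of_ne_nil _ hne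
        have := hub k0 hk0; have := hpos k0 hk0; omega
      simp only [BInv, hstep, hks', if_neg hvp]
      refine ⟨hdict, ?_, ?_, ?_⟩
      · rw [hmap, hksnil]
        simp [hc1']
      · rw [hksnil]
        simp only [List.nil_append, List.countP_cons, List.countP_nil, hcv]
        simp [hc1']
      · intro k0 hk0
        rw [hksnil] at hk0
        simp only [List.nil_append, List.filter_cons, List.filter_nil, hcv, beq_self_eq_true,
          if_true] at hk0
        simp at hk0
        rw [hk0]
    · -- c ≤ top: the appended key cannot raise the max
      have hTw : ∃ k0 ∈ PySem.Set.ofList pre, (pre.count k0 : Int) = top := by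
        rcases PySem.List.foldl_max_mem ((PySem.Set.ofList pre).map (fun k => (pre.count k : Int))) 0 with h0 | hmem'
        · exfalso; rw [hT] at *; omega
        · rw [← hT] at hmem'
          obtain ⟨k0, hk0, hk0e⟩ := List.mem_map.mp hmem'
          exact ⟨k0, hk0, hk0e⟩
      have hTnew : ((PySem.Set.ofList pre ++ [v]).map (fun k => ((pre ++ [v]).count k : Int))).foldl max 0 = top := by
        rw [hmap]
        obtain ⟨k0, hk0, hk0e⟩ := hTw
        apply foldl_max_zero_eq
        · exact List.mem_append_left _ (List.mem_map.mpr ⟨k0, hk0, hk0e⟩)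
        · intro y hy
          rcases List.mem_append.mp hy with hy | hy
          · obtain ⟨k, hk, rfl⟩ := List.mem_map.mp hy; exact hub k hk
          · simp at hy; omega
        · have := hpos k0 hk0; omega
      have hcountsplit : (PySem.Set.ofList pre ++ [v]).countP (fun k => (((pre ++ [v]).count k : Int)) == top)
          = (PySem.Set.ofList pre).countP (fun k => ((pre.count k : Int)) == top)
            + (if c = top then 1 else 0) := by
        rw [List.countP_append]
        congr 1
        · exact List.countP_congr (fun k hk => by
            rw [hcother k (fun h => hvnk (h ▸ hk))])
        · by_cases hct : c = top
          · have hb : (((pre ++ [v]).count v : Int) == top) = true := by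
              rw [hcv, hct]; simp
            simp only [List.countP_cons, List.countP_nil, hb]
            simp
            omega
          · have hb : (((pre ++ [v]).count v : Int) == top) = false := by
              rw [hcv]; simp only [beq_eq_false_iff_ne]; exact hct
            simp only [List.countP_cons, List.countP_nil, hb]
            simp
            omega
      have hfsplit : (PySem.Set.ofList pre ++ [v]).filter (fun k => (((pre ++ [v]).count k : Int)) == top)
          = (PySem.Set.ofList pre).filter (fun k => ((pre.count k : Int)) == top)
            ++ (if c = top then [v] else []) := by
        rw [List.filter_append]
        congr 1
        · exact List.filter_congr (fun k hk => by
            rw [hcother k (fun h => hvnk (h ▸ hk))])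
        · by_cases hct : c = top
          · have hb : (((pre ++ [v]).count v : Int) == top) = true := by
              rw [hcv, hct]; simp
            simp only [List.filter_cons, List.filter_nil, hb]
            simp [hct]
          · have hb : (((pre ++ [v]).count v : Int) == top) = false := by
              rw [hcv]; simp only [beq_eq_false_iff_ne]; exact hct
            simp only [List.filter_cons, List.filter_nil, hb]
            simp [hct]
      by_cases h2 : c = top
      · have hstep : bStep (d, top, nl, ld) v = (d.insert v c, top, nl + 1, ld) := by
          simp only [bStep, hgetD, ← hc]
          rw [if_neg h1, if_pos h2]
        have hold1 : 1 ≤ (PySem.Set.ofList pre).countP (fun k => ((pre.count k : Int)) == top) := by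
          obtain ⟨k0, hk0, hk0e⟩ := hTw
          exact List.countP_pos_iff.mpr ⟨k0, hk0, by simp [hk0e]⟩
        simp only [BInv, hstep, hks', if_neg hvp]
        refine ⟨hdict, hTnew.symm, ?_, ?_⟩
        · rw [hcountsplit, if_pos h2, hN]; push_cast; ring
        · intro k0 hk0
          exfalso
          have h1' : (PySem.Set.ofList pre ++ [v]).countP (fun k => (((pre ++ [v]).count k : Int)) == top) = 1 := by
            rw [List.countP_eq_length_filter, hk0]; rfl
          rw [hcountsplit, if_pos h2] at h1'
          omega
      · have hstep : bStep (d, top, nl, ld) v = (d.insert v c, top, nl, ld) := by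
          simp only [bStep, hgetD, ← hc]
          rw [if_neg h1, if_neg h2]
        simp only [BInv, hstep, hks', if_neg hvp]
        refine ⟨hdict, hTnew.symm, ?_, ?_⟩
        · rw [hcountsplit, if_neg h2, hN]; push_cast; ring
        · intro k0 hk0
          rw [hfsplit, if_neg h2, List.append_nil] at hk0
          exact hL k0 hk0

theorem bFold_inv (rest pre : List String) (s : PySem.Dict String Int × Int × Int × Option String)
    (h : BInv pre s) : BInv (pre ++ rest) (rest.foldl bStep s) := by
  induction rest generalizing pre s with
  | nil => simpa using h
  | cons r t ih =>
    have := ih (pre ++ [r]) (bStep s r) (bStep_inv pre s r h)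
    simpa [List.append_assoc] using this

theorem bInv_nil : BInv [] (PySem.Dict.empty, 0, 0, none) := by
  refine ⟨rfl, rfl, rfl, ?_⟩
  intro k0 hk0
  simp [PySem.Set.ofList] at hk0

theorem quorum_decision_eq_alt (jv : List String) :
    quorum_decision jv = quorum_decision_alt jv := by
  by_cases hjv : jv = []
  · subst hjv; rfl
  · have hinv : BInv jv (jv.foldl bStep (PySem.Dict.empty, 0, 0, none)) := by
      simpa using bFold_inv jv [] _ bInv_nil
    unfold quorum_decision quorum_decision_alt
    obtain ⟨hd, hT, hN, hL⟩ := hinv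
    simp only [hjv, if_false]
    set sfin := jv.foldl bStep (PySem.Dict.empty, 0, 0, none) with hsfin
    set c := PySem.Dict.counter jv with hc
    rw [hd]
    -- basic facts about the counter
    have hnd : (PySem.Set.ofList jv).Nodup := PySem.Set.nodup_ofList jv
    have hitems : c.items = (PySem.Set.ofList jv).map (fun k => (k, (jv.count k : Int))) :=
      PySem.Dict.items_counter jv
    obtain ⟨v, rest, rfl⟩ := List.exists_cons_of_ne_nil hjv
    have hvset : v ∈ PySem.Set.ofList (v :: rest) := (PySem.Set.mem_ofList _ _).mpr List.mem_cons_self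
    have hine : c.items ≠ [] := by
      rw [hitems]
      intro h
      rw [List.map_eq_nil_iff.mp h] at hvset
      simp at hvset
    simp only [hine, if_false]
    set jl : List String := v :: rest with hjl
    set mc := PySem.List.sorted c.items (fun p => p.2) true with hmc
    have hperm : mc.Perm c.items := PySem.List.sorted_perm _ _ _
    obtain ⟨m, t, hmt⟩ : ∃ m t, mc = m :: t := by
      rcases hx : mc with _ | ⟨m, t⟩
      · exact absurd ((PySem.List.sorted_eq_nil_iff _ _ _).mp hx) hine
      · exact ⟨m, t, rfl⟩
    have hhead : PySem.List.pyGetD mc 0 ("", 0) = m := by rw [hmt]; simp [pysem]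
    have hmmem : m ∈ c.items := hperm.mem_iff.mp (hmt ▸ List.mem_cons_self)
    obtain ⟨km, hkm, hkme⟩ := List.mem_map.mp (hitems ▸ hmmem)
    have hm2 : m.2 = (jl.count km : Int) := by rw [← hkme]
    have hm1 : m.1 = km := by rw [← hkme]
    have hpos : ∀ k ∈ PySem.Set.ofList jl, (1 : Int) ≤ (jl.count k : Int) := by
      intro k hk
      exact_mod_cast List.count_pos_iff.mpr ((PySem.Set.mem_ofList _ _).mp hk)
    -- the sorted head carries the maximum count, which is B's top
    have hub : ∀ p ∈ c.items, p.2 ≤ m.2 := by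
      intro p hp
      have hs : PySem.List.sorted c.items (fun p => p.2) true = m :: t := by
        rw [← hmc]; exact hmt
      exact PySem.List.key_head_sorted_rev_ge c.items (fun p => p.2) hs p hp
    have hTm : sfin.2.1 = m.2 := by
      rw [hT]
      apply foldl_max_zero_eq
      · exact List.mem_map.mpr ⟨km, hkm, by omega⟩
      · intro y hy
        obtain ⟨k, hk, rfl⟩ := List.mem_map.mp hy
        exact hub _ (hitems ▸ List.mem_map.mpr ⟨k, hk, rfl⟩)
      · have := hpos km hkm; omega
    -- filters on items vs on the key set
    have hfilt : c.items.filter (fun p => p.2 == m.2)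
        = ((PySem.Set.ofList jl).filter (fun k => ((jl.count k : Int)) == m.2)).map
            (fun k => (k, (jl.count k : Int))) := by
      rw [hitems, List.filter_map]
      rfl
    have hNlen : sfin.2.2.1
        = ((c.items.filter (fun p => p.2 == m.2)).length : Int) := by
      rw [hN, hTm, hfilt, List.length_map, List.countP_eq_length_filter]
    have hfperm : (mc.filter (fun p => p.2 == m.2)).Perm (c.items.filter (fun p => p.2 == m.2)) :=
      hperm.filter _
    by_cases hlen1 : mc.length = 1
    · -- A's single-agent branch
      have ht : t = [] := by rw [hmt] at hlen1; simpa using hlen1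
      have hitems1 : c.items = [m] := by
        have h2 : mc.Perm [m] := by rw [hmt, ht]
        exact List.perm_singleton.mp (hperm.symm.trans h2)
      have hfm : c.items.filter (fun p => p.2 == m.2) = [m] := by
        rw [hitems1]; simp
      have hN1 : sfin.2.2.1 = 1 := by rw [hNlen, hfm]; rfl
      have hld : sfin.2.2.2 = some m.1 := by
        apply hL
        rw [hTm]
        have hh := hfilt
        rw [hfm] at hh
        obtain ⟨k1, hk1⟩ := List.length_eq_one_iff.mp (by
          have hl := congrArg List.length hh
          simp only [List.length_map, List.length_singleton] at hl
          exact hl.symm)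
        rw [hk1] at hh
        simp only [List.map_cons, List.map_nil] at hh
        have hk1m : (k1, (jl.count k1 : Int)) = m := by
          injection hh.symm with ha hb
        rw [hk1, ← hk1m]
      rw [if_pos hlen1, hhead]
      rw [if_pos hN1, hld, hTm]
    · rw [if_neg hlen1, hhead]
      have hlenf : (mc.filter (fun p => p.2 == m.2)).length
                 = (c.items.filter (fun p => p.2 == m.2)).length := hfperm.length_eq
      by_cases h1 : ((mc.filter (fun p => p.2 == m.2)).map (fun p => p.1)).length = 1
      · rw [if_pos h1]
        have hlen : (c.items.filter (fun p => p.2 == m.2)).length = 1 := by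
          rw [← hlenf]; simpa using h1
        obtain ⟨q, hq⟩ := List.length_eq_one_iff.mp hlen
        have hA : mc.filter (fun p => p.2 == m.2) = [q] :=
          List.perm_singleton.mp (hq ▸ hfperm)
        have hN1 : sfin.2.2.1 = 1 := by rw [hNlen, hlen]; rfl
        have hld : sfin.2.2.2 = some q.1 := by
          apply hL
          have hq' : ((PySem.Set.ofList jl).filter (fun k => ((jl.count k : Int)) == m.2)).map
              (fun k => (k, (jl.count k : Int))) = [q] := by rw [← hfilt, hq]
          obtain ⟨k1, hk1⟩ := List.length_eq_one_iff.mp (by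
            have := congrArg List.length hq'
            simp only [List.length_map, List.length_singleton] at this
            exact this)
          rw [hk1] at hq'
          simp only [List.map_cons, List.map_nil] at hq'
          have hk1m : (k1, (jl.count k1 : Int)) = q := by
            injection hq' with ha hb
          rw [hTm, hk1, ← hk1m]
        rw [if_pos hN1, hld, hTm, hA]
        simp [pysem]
      · rw [if_neg h1]
        have hN1 : ¬ sfin.2.2.1 = 1 := by
          rw [hNlen]
          simp only [List.length_map] at h1
          rw [← hlenf]
          omega
        rw [if_neg hN1, hTm]

-- ===== VERDICT (by name: the statement is the Claim_ definition above) =====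
theorem quorum_decision_spec : Claim_equal_quorum_decision := by
  intro jv _
  exact quorum_decision_eq_alt jv
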